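-- pv_equiv track=rewrite | github.com/OpenBMB/UltraEval-Audio | audio_evals/models/model_pool.py | _compute_gpu_assignments
-- ===== SOURCE A (Python) =====
-- from typing import Callable, Any, Dict, List, Optional
--
-- def _compute_gpu_assignments(gpu_ids: List[int], num_instances: int) -> List[List[int]]:
--     """
--     计算每个实例的 GPU 分配
--
--     - 当 num_instances >= len(gpu_ids) 时：GPU 循环分配，多个实例可能共用同一个 GPU
--     - 当 num_instances < len(gpu_ids) 时：每个实例分配多个 GPU
--
--     Args:
--         gpu_ids: 可用 GPU ID 列表
--         num_instances: 实例数量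
--
--     Returns:
--         每个实例分配的 GPU ID 列表，如 [[0, 1], [2, 3]] 表示实例 0 用 GPU 0,1，实例 1 用 GPU 2,3
--     """
--     n_gpus = len(gpu_ids)
--
--     if num_instances >= n_gpus:
--         # GPU 数量不足，每个实例分配一个 GPU（循环使用）
--         return [[gpu_ids[i % n_gpus]] for i in range(num_instances)]
--     else:
--         # GPU 数量充足，每个实例分配多个 GPU
--         # 计算基础分配数和余数
--         base_count = n_gpus // num_instances
--         remainder = n_gpus % num_instances
--
--         assignments = []
--         gpu_idx = 0
--         for i in range(num_instances):
--             # 前 remainder 个实例多分配 1 个 GPU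
--             count = base_count + (1 if i < remainder else 0)
--             assigned = gpu_ids[gpu_idx:gpu_idx + count]
--             assignments.append(assigned)
--             gpu_idx += count
--
--         return assignments
-- ===== SOURCE B (Python) =====
-- from typing import List
--
-- def _compute_gpu_assignments(gpu_ids: List[int], num_instances: int) -> List[List[int]]:
--     n = len(gpu_ids)
--     if num_instances >= n:
--         # round-robin: repeat the GPU list until it covers every instance, then truncate
--         flat = []
--         while len(flat) < num_instances:
--             flat.extend(gpu_ids)
--         return [[g] for g in flat[:num_instances]]
--     # chunked: scatter each GPU position to its owning instance via the inverse owner formula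
--     base, rem = divmod(n, num_instances)
--     cut = rem * (base + 1)  # first position owned by a non-extra instance
--     owners = {}
--     for pos, g in enumerate(gpu_ids):
--         owner = pos // (base + 1) if pos < cut else rem + (pos - cut) // base
--         owners.setdefault(owner, []).append(g)
--     return [owners.get(i, []) for i in range(num_instances)]
-- ===== Notes on version B (the rewrite author's own statement) =====
-- stated objective: alternative
-- what changed: The round-robin branch now repeats the whole GPU list until it covers all instances and truncates (no modular indexing), and the chunked branch is inverted into a single grouping pass over the GPUs that computes each position's owning instance by a closed-form inverse formula and scatters into a dict of buckets, instead of slicing per instance with a running offset.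
import Mathlib
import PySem

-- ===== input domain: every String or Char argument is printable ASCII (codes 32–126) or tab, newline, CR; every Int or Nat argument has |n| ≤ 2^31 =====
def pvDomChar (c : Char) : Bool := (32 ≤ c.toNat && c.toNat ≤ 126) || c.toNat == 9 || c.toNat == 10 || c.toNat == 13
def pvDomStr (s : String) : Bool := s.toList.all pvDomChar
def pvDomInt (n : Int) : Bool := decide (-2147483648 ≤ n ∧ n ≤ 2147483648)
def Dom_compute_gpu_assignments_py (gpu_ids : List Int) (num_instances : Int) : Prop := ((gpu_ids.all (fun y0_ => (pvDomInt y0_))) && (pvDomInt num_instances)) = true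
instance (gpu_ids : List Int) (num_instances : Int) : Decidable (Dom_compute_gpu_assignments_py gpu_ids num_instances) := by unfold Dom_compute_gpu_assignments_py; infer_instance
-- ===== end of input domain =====

-- B replaces A's modular round-robin indexing by repeat-the-list-then-truncate, and A's
-- per-instance slicing with a running offset by one grouping pass over the GPUs that scatters
-- each GPU to its owning instance (a closed-form inverse formula); objective: alternative.

-- ===== PORT A =====
-- A's else-loop: for i in range(num_instances): count = base+(1 if i<rem else 0);
-- assigned = gpu_ids[gpu_idx:gpu_idx+count]; append; gpu_idx += count   (structural recursion, same state)
def pvALoop (gpu_ids : List Int) (base rem : Int) : List Int → Int → List (List Int)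
  | [], _ => []
  | i :: is, gpu_idx =>
      let count := base + (if i < rem then (1 : Int) else 0)
      PySem.List.slice gpu_ids (some gpu_idx) (some (gpu_idx + count)) ::
        pvALoop gpu_ids base rem is (gpu_idx + count)

def compute_gpu_assignments_py (gpu_ids : List Int) (num_instances : Int) : List (List Int) :=
  let n_gpus : Int := gpu_ids.length
  if num_instances ≥ n_gpus then
    -- gpu_ids[i % n_gpus]: exact on Pre_ (n_gpus > 0 there ⇒ index in range); Pre_ excludes the ZeroDivisionError inputs
    (PySem.List.pyRange 0 num_instances 1).map
      (fun i => [PySem.List.pyGetD gpu_ids (PySem.Int.mod i n_gpus) 0])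
  else
    let base_count := PySem.Int.floordiv n_gpus num_instances
    let remainder := PySem.Int.mod n_gpus num_instances
    pvALoop gpu_ids base_count remainder (PySem.List.pyRange 0 num_instances 1) 0

-- ===== PORT B =====
-- Source B's 'while len(flat) < num_instances: flat.extend(gpu_ids)'; the fuel argument only makes the
-- loop total in Lean — inside Pre_ each pass adds ≥ 1 element, so num_instances.toNat passes suffice
-- and the fueled recursion performs exactly the Python loop's iterations.
def pvCyc (gpu_ids : List Int) (num : Int) : Nat → List Int → List Int
  | 0, flat => flat
  | fuel + 1, flat =>
      if (flat.length : Int) < num then pvCyc gpu_ids num fuel (flat ++ gpu_ids) else flat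

-- Source B's owner formula: pos // (base+1) if pos < cut else rem + (pos - cut) // base
def pvOwner (base rem pos : Int) : Int :=
  if pos < rem * (base + 1) then PySem.Int.floordiv pos (base + 1)
  else rem + PySem.Int.floordiv (pos - rem * (base + 1)) base

def compute_gpu_assignments_py_alt (gpu_ids : List Int) (num_instances : Int) : List (List Int) :=
  let n : Int := gpu_ids.length
  if num_instances ≥ n then
    let flat := pvCyc gpu_ids num_instances num_instances.toNat []
    (PySem.List.slice flat none (some num_instances)).map (fun g => [g])
  else
    let base := PySem.Int.floordiv n num_instances
    let rem := PySem.Int.mod n num_instances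
    -- owners.setdefault(owner, []).append(g)  =  d.modify owner [] (· ++ [g])
    let owners := (PySem.List.enumerate gpu_ids 0).foldl
      (fun d pg => d.modify (pvOwner base rem pg.1) [] (· ++ [pg.2])) PySem.Dict.empty
    (PySem.List.pyRange 0 num_instances 1).map (fun i => owners.getD i [])

-- ===== PRECONDITION & SPEC =====
-- Pre_ excludes exactly the inputs where A raises ZeroDivisionError (i % 0 when gpu_ids is empty
-- and num_instances > 0; n // 0 when num_instances == 0 and gpu_ids is nonempty); B returns no value there either.
def Pre_compute_gpu_assignments_py (gpu_ids : List Int) (num_instances : Int) : Prop :=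
  ¬(0 < num_instances ∧ gpu_ids = []) ∧ ¬(num_instances = 0 ∧ gpu_ids ≠ [])
instance (gpu_ids : List Int) (num_instances : Int) : Decidable (Pre_compute_gpu_assignments_py gpu_ids num_instances) := by unfold Pre_compute_gpu_assignments_py; infer_instance

def pvWitness_compute_gpu_assignments_py : List Int × Int := ([0, 1, 2, 3, 4], 2)

def Spec_compute_gpu_assignments_py (gpu_ids : List Int) (num_instances : Int) (out : List (List Int)) : Prop := out = compute_gpu_assignments_py_alt gpu_ids num_instances
instance (gpu_ids : List Int) (num_instances : Int) (out : List (List Int)) : Decidable (Spec_compute_gpu_assignments_py gpu_ids num_instances out) := by unfold Spec_compute_gpu_assignments_py; infer_instance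

-- ===== CLAIM =====
def Claim_equal_compute_gpu_assignments_py : Prop := ∀ (gpu_ids : List Int) (num_instances : Int), Dom_compute_gpu_assignments_py gpu_ids num_instances → Pre_compute_gpu_assignments_py gpu_ids num_instances → Spec_compute_gpu_assignments_py gpu_ids num_instances (compute_gpu_assignments_py gpu_ids num_instances)

-- ===== LEMMAS AND PROOFS =====

-- the closed-form chunk boundary: instance i's chunk starts at i*base + min i rem
def pvSt (base rem i : Int) : Int := i * base + min i rem

-- A's loop invariant: starting the accumulator at pvSt j, the loop over range(j, num)
-- produces the closed-form slices for those indices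
theorem pvALoop_eq (gpu_ids : List Int) (base rem num : Int) :
    ∀ (k : Nat) (j : Int), 0 ≤ j → (num - j).toNat = k →
      pvALoop gpu_ids base rem (PySem.List.pyRange j num 1) (pvSt base rem j)
        = (PySem.List.pyRange j num 1).map
            (fun i => PySem.List.slice gpu_ids (some (pvSt base rem i))
                                               (some (pvSt base rem (i + 1)))) := by
  intro k
  induction k with
  | zero =>
      intro j hj hk
      rw [PySem.List.pyRange_one_eq_nil (by omega)]
      rfl
  | succ k ih =>
      intro j hj hk
      rw [PySem.List.pyRange_one_cons (by omega)]
      simp only [pvALoop, List.map_cons]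
      have hstep : pvSt base rem j + (base + (if j < rem then (1 : Int) else 0))
          = pvSt base rem (j + 1) := by
        unfold pvSt
        rcases lt_or_ge j rem with h | h
        · simp only [if_pos h, min_eq_left (by omega : j ≤ rem),
            min_eq_left (by omega : j + 1 ≤ rem)]; ring
        · simp only [if_neg (by omega : ¬ j < rem), min_eq_right (by omega : rem ≤ j),
            min_eq_right (by omega : rem ≤ j + 1)]; ring
      rw [hstep, ih (j + 1) (by omega) (by omega)]

-- length of k concatenated copies
theorem pvRepLen (xs : List Int) (k : Nat) :
    ((List.replicate k xs).flatten).length = k * xs.length := by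
  induction k with
  | zero => simp
  | succ k ih =>
      simp only [List.replicate_succ, List.flatten_cons, List.length_append, ih]
      ring

-- B's while-loop keeps flat a whole number of copies of gpu_ids, and with enough fuel
-- it ends with length ≥ num
theorem pvCyc_rep (gpu_ids : List Int) (num : Int) :
    ∀ (fuel k : Nat), 0 < gpu_ids.length →
      num ≤ ((k + fuel : Nat) : Int) * gpu_ids.length →
      ∃ K : Nat, pvCyc gpu_ids num fuel ((List.replicate k gpu_ids).flatten)
            = (List.replicate K gpu_ids).flatten ∧ num ≤ (K : Int) * gpu_ids.length := by
  intro fuel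
  induction fuel with
  | zero =>
      intro k hpos hle
      exact ⟨k, rfl, by simpa using hle⟩
  | succ fuel ih =>
      intro k hpos hle
      by_cases h : (((List.replicate k gpu_ids).flatten).length : Int) < num
      · have hstep : (List.replicate k gpu_ids).flatten ++ gpu_ids
            = (List.replicate (k + 1) gpu_ids).flatten := by
          rw [List.replicate_succ' (n := k), List.flatten_append]; simp
        have hrec := ih (k + 1) hpos (by
          have hc : ((k + 1 + fuel : Nat) : Int) = ((k + (fuel + 1) : Nat) : Int) := by
            push_cast; ring
          rw [hc]; exact hle)
        simp only [pvCyc]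
        rw [if_pos h, hstep]
        exact hrec
      · exact ⟨k, by simp only [pvCyc]; rw [if_neg h], by
          have := pvRepLen gpu_ids k
          omega⟩

-- indexing into repeated copies is modular indexing
theorem pvRepGetD (xs : List Int) :
    ∀ (K j : Nat) (d : Int), 0 < xs.length → j < K * xs.length →
      ((List.replicate K xs).flatten).getD j d = xs.getD (j % xs.length) d := by
  intro K
  induction K with
  | zero => intro j d _ hj; omega
  | succ K ih =>
      intro j d hpos hj
      rw [List.replicate_succ, List.flatten_cons]
      by_cases hlt : j < xs.length
      · rw [List.getD_append _ _ _ _ hlt, Nat.mod_eq_of_lt hlt]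
      · have hle : xs.length ≤ j := by omega
        rw [List.getD_append_right _ _ _ _ hle, ih (j - xs.length) d hpos (by
          have h2 : (K + 1) * xs.length = K * xs.length + xs.length := by ring
          omega)]
        conv_rhs => rw [Nat.mod_eq_sub_mod hle]

-- filtering an enumerate by an interval predicate is take-then-drop
theorem pvFmInterval (P : Int → Bool) :
    ∀ (xs : List Int) (s : Int) (a b : Nat),
      (∀ j : Nat, j < xs.length → (P (s + (j : Int)) = true ↔ (a ≤ j ∧ j < b))) →
      ((PySem.List.enumerate xs s).filter (fun pg => P pg.1)).map (·.2)
        = (xs.take b).drop a := by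
  intro xs
  induction xs with
  | nil => intro s a b _; simp [PySem.List.enumerate_nil]
  | cons x xs ih =>
      intro s a b h
      have hx : P s = true ↔ (a ≤ 0 ∧ 0 < b) := by
        have := h 0 (by simp)
        simpa using this
      have htail : ∀ j : Nat, j < xs.length →
          (P (s + 1 + (j : Int)) = true ↔ (a - 1 ≤ j ∧ j < b - 1)) := by
        intro j hj
        have hj1 := h (j + 1) (by simp; omega)
        constructor
        · intro hp
          have := hj1.mp (by
            have hc : s + ((j + 1 : Nat) : Int) = s + 1 + (j : Int) := by push_cast; ring
            rwa [hc])
          omega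
        · intro hb
          have h2 := hj1.mpr (by omega)
          have h3 : s + ((j + 1 : Nat) : Int) = s + 1 + (j : Int) := by push_cast; ring
          rwa [h3] at h2
      rw [PySem.List.enumerate_cons]
      by_cases hp : P s = true
      · have hab : a = 0 ∧ 0 < b := by
          have := hx.mp (by simpa using hp)
          omega
        obtain ⟨ha, hb⟩ := hab
        obtain ⟨b', rfl⟩ : ∃ b', b = b' + 1 := ⟨b - 1, by omega⟩
        rw [List.filter_cons_of_pos (by simpa using hp), List.map_cons,
          ih (s + 1) (a - 1) (b' + 1 - 1) htail]
        simp [ha]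
      · have hpf : P s = false := by simpa using hp
        rw [List.filter_cons_of_neg (by simpa using hpf), ih (s + 1) (a - 1) (b - 1) htail]
        rcases Nat.eq_zero_or_pos b with hb0 | hbpos
        · simp [hb0]
        · have ha : 0 < a := by
            by_contra hc
            exact hp (hx.mpr (by omega))
          obtain ⟨b', rfl⟩ : ∃ b', b = b' + 1 := ⟨b - 1, by omega⟩
          obtain ⟨a', rfl⟩ : ∃ a', a = a' + 1 := ⟨a - 1, by omega⟩
          simp [List.take_succ_cons, List.drop_succ_cons]

-- the owner formula inverts the chunk boundaries: a position inside chunk i is owned by i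
theorem pvOwner_of_bounds (base rem : Int) (hb : 1 ≤ base) (i p : Int)
    (hlo : pvSt base rem i ≤ p) (hhi : p < pvSt base rem (i + 1)) :
    pvOwner base rem p = i := by
  unfold pvSt at hlo hhi
  unfold pvOwner
  rcases lt_or_ge i rem with h | h
  · rw [min_eq_left (by omega : i ≤ rem)] at hlo
    rw [min_eq_left (by omega : i + 1 ≤ rem)] at hhi
    have hcut : p < rem * (base + 1) := by
      have h1 : (i + 1) * (base + 1) ≤ rem * (base + 1) :=
        mul_le_mul_of_nonneg_right (by omega) (by omega)
      nlinarith
    rw [if_pos hcut, PySem.Int.floordiv_eq_iff_of_pos (by omega : (0:Int) < base + 1)]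
    constructor
    · nlinarith
    · nlinarith
  · rw [min_eq_right (by omega : rem ≤ i)] at hlo
    rw [min_eq_right (by omega : rem ≤ i + 1)] at hhi
    have hge : rem * (base + 1) ≤ p := by
      have h1 : rem * base ≤ i * base := mul_le_mul_of_nonneg_right h (by omega)
      nlinarith
    rw [if_neg (by omega)]
    have hq : PySem.Int.floordiv (p - rem * (base + 1)) base = i - rem := by
      rw [PySem.Int.floordiv_eq_iff_of_pos (by omega : (0:Int) < base)]
      constructor
      · nlinarith
      · nlinarith
    rw [hq]; ring

-- every position 0 ≤ p < n lies inside its owner's chunk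
theorem pvOwner_bounds (base rem num n : Int) (hb : 1 ≤ base) (hr0 : 0 ≤ rem)
    (hrn : rem < num) (hn : base * num + rem = n) (p : Int) (hp0 : 0 ≤ p) (hpn : p < n) :
    0 ≤ pvOwner base rem p ∧ pvOwner base rem p < num ∧
      pvSt base rem (pvOwner base rem p) ≤ p ∧ p < pvSt base rem (pvOwner base rem p + 1) := by
  unfold pvOwner
  by_cases hc : p < rem * (base + 1)
  · rw [if_pos hc]
    have hb1 : (0 : Int) < base + 1 := by omega
    have hj0 : 0 ≤ PySem.Int.floordiv p (base + 1) :=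
      (PySem.Int.le_floordiv_iff_mul_le hb1).mpr (by nlinarith)
    have hjlo : PySem.Int.floordiv p (base + 1) * (base + 1) ≤ p :=
      (PySem.Int.le_floordiv_iff_mul_le hb1).mp le_rfl
    have hjhi : p < (PySem.Int.floordiv p (base + 1) + 1) * (base + 1) :=
      (PySem.Int.floordiv_lt_iff_lt_mul hb1).mp (by omega)
    have hjrem : PySem.Int.floordiv p (base + 1) < rem :=
      (PySem.Int.floordiv_lt_iff_lt_mul hb1).mpr hc
    refine ⟨hj0, by omega, ?_, ?_⟩
    · unfold pvSt
      rw [min_eq_left (by omega)]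
      nlinarith
    · unfold pvSt
      rw [min_eq_left (by omega)]
      nlinarith
  · rw [if_neg hc]
    have hbp : (0 : Int) < base := by omega
    have hcl : rem * (base + 1) ≤ p := by omega
    have hq0 : 0 ≤ PySem.Int.floordiv (p - rem * (base + 1)) base :=
      (PySem.Int.le_floordiv_iff_mul_le hbp).mpr (by nlinarith)
    have hqlo : PySem.Int.floordiv (p - rem * (base + 1)) base * base ≤ p - rem * (base + 1) :=
      (PySem.Int.le_floordiv_iff_mul_le hbp).mp le_rfl
    have hqhi : p - rem * (base + 1) < (PySem.Int.floordiv (p - rem * (base + 1)) base + 1) * base :=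
      (PySem.Int.floordiv_lt_iff_lt_mul hbp).mp (by omega)
    have hqn : PySem.Int.floordiv (p - rem * (base + 1)) base < num - rem :=
      (PySem.Int.floordiv_lt_iff_lt_mul hbp).mpr (by nlinarith)
    refine ⟨by omega, by omega, ?_, ?_⟩
    · unfold pvSt
      rw [min_eq_right (by omega)]
      nlinarith
    · unfold pvSt
      rw [min_eq_right (by omega)]
      nlinarith

-- branch 1: modular round-robin indexing equals truncated repetition
theorem pvBranch1 (gpu_ids : List Int) (num : Int) (K : Nat) (hpos : 0 < gpu_ids.length)
    (hnum0 : 0 ≤ num) (hK : num ≤ (K : Int) * gpu_ids.length) :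
    (PySem.List.pyRange 0 num 1).map
        (fun i => [PySem.List.pyGetD gpu_ids (PySem.Int.mod i (gpu_ids.length : Int)) 0])
      = (PySem.List.slice ((List.replicate K gpu_ids).flatten) none (some num)).map
          (fun g => [g]) := by
  have hm : ((num.toNat : Nat) : Int) = num := Int.toNat_of_nonneg hnum0
  have hKm : num.toNat ≤ K * gpu_ids.length := by
    have h1 : ((num.toNat : Nat) : Int) ≤ ((K * gpu_ids.length : Nat) : Int) := by
      push_cast
      rw [hm]
      exact hK
    exact_mod_cast h1
  rw [← hm, PySem.List.slice_to_natCast]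
  apply List.ext_getElem
  · rw [List.length_map, List.length_map, PySem.List.length_pyRange_one, List.length_take,
      pvRepLen]
    omega
  · intro j h1 h2
    have hjlt : j < num.toNat := by
      rw [List.length_map, PySem.List.length_pyRange_one] at h1
      omega
    simp only [List.getElem_map]
    rw [PySem.List.getElem_pyRange_one, List.getElem_take]
    have hjrep : j < ((List.replicate K gpu_ids).flatten).length := by
      rw [pvRepLen]; omega
    rw [← List.getD_eq_getElem _ 0 hjrep, pvRepGetD gpu_ids K j 0 hpos (by omega)]
    have hc : PySem.Int.mod ((0 : Int) + (j : Int)) (gpu_ids.length : Int)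
        = ((j % gpu_ids.length : Nat) : Int) := by
      rw [zero_add]
      exact_mod_cast PySem.Int.mod_natCast j gpu_ids.length
    rw [hc, PySem.List.pyGetD_natCast]

-- ===== VERDICT =====
theorem compute_gpu_assignments_py_spec : Claim_equal_compute_gpu_assignments_py := by
  intro gpu_ids num _ hpre
  unfold Spec_compute_gpu_assignments_py
  simp only [compute_gpu_assignments_py, compute_gpu_assignments_py_alt]
  by_cases hge : num ≥ (gpu_ids.length : Int)
  · rw [if_pos hge, if_pos hge]
    by_cases hlen : gpu_ids.length = 0
    · have hnil : gpu_ids = [] := List.length_eq_zero_iff.mp hlen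
      have hnum : num = 0 := by
        rcases hpre with ⟨h1, _⟩
        by_contra hc
        exact h1 ⟨by rw [hnil] at hge; simp at hge; omega, hnil⟩
      subst hnil hnum
      decide
    · have hpos : 0 < gpu_ids.length := Nat.pos_of_ne_zero hlen
      have hnum0 : 0 ≤ num := le_trans (by exact_mod_cast Nat.zero_le _) hge
      obtain ⟨K, hflat, hK⟩ := pvCyc_rep gpu_ids num num.toNat 0 hpos (by
        have h1 : (1 : Int) ≤ (gpu_ids.length : Int) := by exact_mod_cast hpos
        have h2 : ((num.toNat : Nat) : Int) = num := Int.toNat_of_nonneg hnum0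
        have h3 : ((0 + num.toNat : Nat) : Int) = num := by push_cast; omega
        rw [h3]
        nlinarith)
      have hflat' : pvCyc gpu_ids num num.toNat [] = (List.replicate K gpu_ids).flatten := by
        simpa using hflat
      rw [hflat']
      exact pvBranch1 gpu_ids num K hpos hnum0 hK
  · rw [if_neg hge, if_neg hge]
    rcases lt_trichotomy num 0 with hneg | hzero | hposn
    · rw [PySem.List.pyRange_one_eq_nil (le_of_lt hneg)]
      rfl
    · exfalso
      apply hpre.2
      refine ⟨hzero, ?_⟩
      intro he
      subst he
      simp at hge
      omega
    · -- num > 0 and num < n : the chunked branch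
      have hnlt : num < (gpu_ids.length : Int) := by omega
      set n : Int := (gpu_ids.length : Int) with hn
      set base : Int := PySem.Int.floordiv n num with hbase
      set rem : Int := PySem.Int.mod n num with hrem
      have hb : 1 ≤ base := by
        rw [hbase]
        exact (PySem.Int.le_floordiv_iff_mul_le hposn).mpr (by omega)
      have hr0 : 0 ≤ rem := PySem.Int.mod_nonneg n hposn
      have hrn : rem < num := PySem.Int.mod_lt n hposn
      have hnn : base * num + rem = n := by
        have hdm := PySem.Int.floordiv_mul_add_mod n num
        rw [hbase, hrem]
        linarith
      have h0 : pvSt base rem 0 = 0 := by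
        unfold pvSt
        simp [min_eq_left hr0]
      have hA := pvALoop_eq gpu_ids base rem num (num - 0).toNat 0 le_rfl rfl
      rw [h0] at hA
      rw [hA]
      apply List.map_congr_left
      intro i hi
      obtain ⟨hi0, hin⟩ := PySem.List.mem_pyRange_one.mp hi
      have hsti : 0 ≤ pvSt base rem i := by
        unfold pvSt
        have h1 : 0 ≤ i * base := mul_nonneg hi0 (by omega)
        have h2 : 0 ≤ min i rem := le_min hi0 hr0
        linarith
      have hsti1 : 0 ≤ pvSt base rem (i + 1) := by
        unfold pvSt
        have h1 : 0 ≤ (i + 1) * base := mul_nonneg (by omega) (by omega)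
        have h2 : 0 ≤ min (i + 1) rem := le_min (by omega) hr0
        linarith
      have hR : ((PySem.List.enumerate gpu_ids 0).foldl
            (fun d pg => d.modify (pvOwner base rem pg.1) [] (· ++ [pg.2]))
            PySem.Dict.empty).getD i []
          = ((PySem.List.enumerate gpu_ids 0).filter
              (fun pg => pvOwner base rem pg.1 == i)).map (·.2) := by
        have hsplit : (PySem.List.enumerate gpu_ids 0).foldl
              (fun d pg => d.modify (pvOwner base rem pg.1) [] (· ++ [pg.2]))
              PySem.Dict.empty
            = ((PySem.List.enumerate gpu_ids 0).map
                (fun pg => (pvOwner base rem pg.1, pg.2))).foldl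
                (fun d p => d.modify p.1 [] (· ++ [p.2])) PySem.Dict.empty := by
          rw [List.foldl_map]
        rw [hsplit, PySem.Dict.getD_foldl_modify_append]
        simp only [List.filter_map, List.map_map]
        have hemp : (PySem.Dict.empty : PySem.Dict Int (List Int)).getD i [] = [] := by simp
        rw [hemp, List.nil_append]
        rfl
      rw [hR]
      have hiff : ∀ j : Nat, j < gpu_ids.length →
          (((fun p => pvOwner base rem p == i) ((0 : Int) + (j : Int))) = true ↔
            ((pvSt base rem i).toNat ≤ j ∧ j < (pvSt base rem (i + 1)).toNat)) := by
        intro j hj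
        simp only [zero_add, beq_iff_eq]
        constructor
        · intro h
          have hbnd := pvOwner_bounds base rem num n hb hr0 hrn hnn (j : Int)
            (Int.natCast_nonneg j) (by rw [hn]; exact_mod_cast hj)
          rw [h] at hbnd
          exact ⟨Int.toNat_le.mpr hbnd.2.2.1, Int.lt_toNat.mpr hbnd.2.2.2⟩
        · rintro ⟨h1, h2⟩
          exact pvOwner_of_bounds base rem hb i (j : Int)
            (Int.toNat_le.mp h1) (Int.lt_toNat.mp h2)
      rw [pvFmInterval (fun p => pvOwner base rem p == i) gpu_ids 0
        (pvSt base rem i).toNat (pvSt base rem (i + 1)).toNat hiff]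
      rw [List.drop_take,
        show pvSt base rem i = (((pvSt base rem i).toNat : Nat) : Int) from
          (Int.toNat_of_nonneg hsti).symm,
        show pvSt base rem (i + 1) = (((pvSt base rem (i + 1)).toNat : Nat) : Int) from
          (Int.toNat_of_nonneg hsti1).symm,
        PySem.List.slice_natCast]
      simp only [Int.toNat_natCast]
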